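-- pv_equiv track=rewrite | github.com/taowen/torch2vk | src/torch2vk/quantize/gguf.py | q4_k_m_more_bits_layer_indices
-- ===== SOURCE A (Python) =====
-- def q4_k_m_more_bits_layer_indices(num_layers: int) -> tuple[int, ...]:
--     if num_layers <= 0:
--         raise ValueError(f"num_layers must be positive, got {num_layers}")
--     first_eighth = num_layers // 8
--     last_eighth = (7 * num_layers) // 8
--     return tuple(
--         layer_idx
--         for layer_idx in range(num_layers)
--         if layer_idx < first_eighth
--         or layer_idx >= last_eighth
--         or (layer_idx - first_eighth) % 3 == 2
--     )
-- ===== SOURCE B (Python) =====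
-- def q4_k_m_more_bits_layer_indices(num_layers: int) -> tuple[int, ...]:
--     if num_layers <= 0:
--         raise ValueError(f"num_layers must be positive, got {num_layers}")
--     first_eighth = num_layers // 8
--     last_eighth = (7 * num_layers) // 8
--     return (
--         tuple(range(first_eighth))
--         + tuple(range(first_eighth + 2, last_eighth, 3))
--         + tuple(range(last_eighth, num_layers))
--     )
-- ===== Notes on version B (the rewrite author's own statement) =====
-- stated objective: simpler
-- what changed: Replaces the predicate-filtered scan over range(num_layers) with direct construction: concatenation of three arithmetic ranges (first eighth, stride-3 middle, last eighth), so no per-element predicate is evaluated.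
import Mathlib
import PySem

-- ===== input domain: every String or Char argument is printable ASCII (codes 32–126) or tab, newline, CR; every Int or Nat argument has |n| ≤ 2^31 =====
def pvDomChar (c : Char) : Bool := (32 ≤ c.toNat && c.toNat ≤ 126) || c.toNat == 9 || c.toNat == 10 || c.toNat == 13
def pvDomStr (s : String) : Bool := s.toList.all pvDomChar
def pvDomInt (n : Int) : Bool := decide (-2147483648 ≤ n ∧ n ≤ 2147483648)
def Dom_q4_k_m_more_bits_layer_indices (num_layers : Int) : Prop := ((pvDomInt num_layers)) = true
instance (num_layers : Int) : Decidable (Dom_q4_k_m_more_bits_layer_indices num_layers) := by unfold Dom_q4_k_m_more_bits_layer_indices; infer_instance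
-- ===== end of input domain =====

-- B builds the result by concatenating three arithmetic ranges instead of filtering range(num_layers) with a predicate (objective: simpler).


-- ===== PORT A =====
def q4_k_m_more_bits_layer_indices (num_layers : Int) : List Int :=
  let first_eighth := PySem.Int.floordiv num_layers 8
  let last_eighth := PySem.Int.floordiv (7 * num_layers) 8
  (PySem.List.pyRange 0 num_layers 1).filter
    (fun layer_idx =>
      decide (layer_idx < first_eighth) || decide (last_eighth ≤ layer_idx)
        || decide (PySem.Int.mod (layer_idx - first_eighth) 3 = 2))

-- ===== PORT B =====
def q4_k_m_more_bits_layer_indices_alt (num_layers : Int) : List Int :=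
  let first_eighth := PySem.Int.floordiv num_layers 8
  let last_eighth := PySem.Int.floordiv (7 * num_layers) 8
  PySem.List.pyRange 0 first_eighth 1
    ++ PySem.List.pyRange (first_eighth + 2) last_eighth 3
    ++ PySem.List.pyRange last_eighth num_layers 1

-- ===== PRECONDITION & SPEC =====
-- Pre_ excludes num_layers ≤ 0, where the Python A raises ValueError.
def Pre_q4_k_m_more_bits_layer_indices (num_layers : Int) : Prop := 0 < num_layers
instance (num_layers : Int) : Decidable (Pre_q4_k_m_more_bits_layer_indices num_layers) := by unfold Pre_q4_k_m_more_bits_layer_indices; infer_instance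
def pvWitness_q4_k_m_more_bits_layer_indices : Int := 24

def Spec_q4_k_m_more_bits_layer_indices (num_layers : Int) (out : List Int) : Prop := out = q4_k_m_more_bits_layer_indices_alt num_layers
instance (num_layers : Int) (out : List Int) : Decidable (Spec_q4_k_m_more_bits_layer_indices num_layers out) := by unfold Spec_q4_k_m_more_bits_layer_indices; infer_instance

-- ===== CLAIM (what is proved, stated in full; the proofs are below) =====
def Claim_equal_q4_k_m_more_bits_layer_indices : Prop := ∀ (num_layers : Int), Dom_q4_k_m_more_bits_layer_indices num_layers → Pre_q4_k_m_more_bits_layer_indices num_layers → Spec_q4_k_m_more_bits_layer_indices num_layers (q4_k_m_more_bits_layer_indices num_layers)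

-- ===== LEMMAS AND PROOFS =====

-- pyRange with step 3: nil and cons forms (specialisations of pyRange_of_pos)
theorem pyRange3_nil (a b : Int) (h : b ≤ a) : PySem.List.pyRange a b 3 = [] := by
  rw [PySem.List.pyRange_of_pos a b (by norm_num)]
  simp [not_lt.2 h]

theorem pyRange3_cons (a b : Int) (h : a < b) :
    PySem.List.pyRange a b 3 = a :: PySem.List.pyRange (a + 3) b 3 := by
  rw [PySem.List.pyRange_of_pos a b (by norm_num),
      PySem.List.pyRange_of_pos (a + 3) b (by norm_num)]
  have hcount : (if a < b then ((b - a + 3 - 1) / 3).toNat else 0)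
      = (if a + 3 < b then ((b - (a + 3) + 3 - 1) / 3).toNat else 0) + 1 := by
    split_ifs <;> omega
  rw [hcount, List.range_succ_eq_map, List.map_cons, List.map_map]
  refine congrArg₂ List.cons (by norm_num) ?_
  apply List.map_congr_left
  intro k _
  simp only [Function.comp]
  push_cast
  ring

-- filtering [a, b) for (i - s) % 3 == 2 yields the stride-3 range from the first hit
theorem stride_filter (s b a : Int) :
    (PySem.List.pyRange a b 1).filter (fun i => decide (PySem.Int.mod (i - s) 3 = 2))
      = PySem.List.pyRange (a + PySem.Int.mod (s + 2 - a) 3) b 3 := by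
  by_cases hab : b ≤ a
  · rw [PySem.List.pyRange_one_eq_nil hab, List.filter_nil]
    have h0 : 0 ≤ PySem.Int.mod (s + 2 - a) 3 := PySem.Int.mod_nonneg _ (by norm_num)
    exact (pyRange3_nil _ _ (by omega)).symm
  · rw [not_le] at hab
    rw [PySem.List.pyRange_one_cons hab, List.filter_cons]
    have hrec := stride_filter s b (a + 1)
    simp only [PySem.Int.mod_eq_emod_of_pos (by norm_num : (0:Int) < 3)] at *
    by_cases hp : (a - s) % 3 = 2
    · have hm : (s + 2 - a) % 3 = 0 := by omega
      have hm1 : (s + 2 - (a + 1)) % 3 = 2 := by omega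
      simp only [hp, decide_true, if_true, hrec, hm1, hm, add_zero]
      rw [pyRange3_cons a b hab]
      have h3 : a + 1 + 2 = a + 3 := by ring
      rw [h3]
    · have hm : (s + 2 - a) % 3 = (s + 2 - (a + 1)) % 3 + 1 := by omega
      simp only [hp, decide_false, Bool.false_eq_true, if_false]
      rw [hrec]
      have harg : a + 1 + (s + 2 - (a + 1)) % 3 = a + (s + 2 - a) % 3 := by omega
      rw [harg]
termination_by (b - a).toNat
decreasing_by omega

theorem q4_k_m_main (n : Int) (hn : 0 < n) :
    q4_k_m_more_bits_layer_indices n = q4_k_m_more_bits_layer_indices_alt n := by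
  unfold q4_k_m_more_bits_layer_indices q4_k_m_more_bits_layer_indices_alt
  set fe := PySem.Int.floordiv n 8 with hfe
  set le := PySem.Int.floordiv (7 * n) 8 with hle
  have hfe' : fe = n / 8 := by rw [hfe, PySem.Int.floordiv_eq_ediv_of_pos (by norm_num)]
  have hle' : le = (7 * n) / 8 := by rw [hle, PySem.Int.floordiv_eq_ediv_of_pos (by norm_num)]
  have h0fe : 0 ≤ fe := by rw [hfe']; omega
  have hfele : fe ≤ le := by rw [hfe', hle']; omega
  have hlen : le ≤ n := by rw [hle']; omega
  rw [PySem.List.pyRange_one_append 0 fe n h0fe (by omega),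
      PySem.List.pyRange_one_append fe le n hfele hlen, List.filter_append, List.filter_append, List.append_assoc]
  congr 1
  · -- first eighth: everything kept
    apply List.filter_eq_self.mpr
    intro x hx
    have := (PySem.List.mem_pyRange_one).mp hx
    simp [this.2]
  congr 1
  · -- middle: only the stride-3 hits
    rw [List.filter_congr (q := fun i => decide (PySem.Int.mod (i - fe) 3 = 2))
      (by intro x hx
          have := (PySem.List.mem_pyRange_one).mp hx
          simp [not_lt.2 this.1, not_le.2 this.2]),
      stride_filter fe le fe]
    congr 1
    have : PySem.Int.mod (fe + 2 - fe) 3 = 2 := by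
      rw [PySem.Int.mod_eq_emod_of_pos (by norm_num : (0:Int) < 3)]; omega
    omega
  · -- last eighth: everything kept
    apply List.filter_eq_self.mpr
    intro x hx
    have := (PySem.List.mem_pyRange_one).mp hx
    simp [this.1]

-- ===== VERDICT (by name: the statement is the Claim_ definition above) =====
theorem q4_k_m_more_bits_layer_indices_spec : Claim_equal_q4_k_m_more_bits_layer_indices := by
  intro n _ hn
  exact q4_k_m_main n hn
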